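-- pv_equiv track=rewrite | github.com/3LENDERMAN/Python_projects | 02/zwelf.py | zwelf_shuffle
-- ===== SOURCE A (Python) =====
-- def zwelf_shuffle(num):
--     normal_part = 0
--     tens_count = 0
--     elevens_count = 0
--     place_value = 1
--
--     # Iterate through every digit in num
--     while num > 0:
--         digit = num % 12  # Digit in 12-base
--         num //= 12  # Shift digit for another iteration
--         if digit == 10:  # 'δ'
--             tens_count += 1
--         elif digit == 11:  # 'ε'
--             elevens_count += 1
--         else:
--             normal_part += digit * place_value
--             place_value *= 12
--
--     while tens_count > 0:
--         normal_part += 10 * place_value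
--         place_value *= 12
--         tens_count -= 1
--
--     while elevens_count > 0:
--         normal_part += 11 * place_value
--         place_value *= 12
--         elevens_count -= 1
--
--     return normal_part
-- ===== SOURCE B (Python) =====
-- def zwelf_shuffle(num):
--     digits = []
--     while num > 0:
--         num, d = divmod(num, 12)
--         digits.append(d)
--     reordered = [d for d in digits if d < 10] + [10] * digits.count(10) + [11] * digits.count(11)
--     result = 0
--     for d in reversed(reordered):
--         result = result * 12 + d
--     return result
-- ===== Notes on version B (the rewrite author's own statement) =====
-- stated objective: alternative
-- what changed: Replaces A's three sequential accumulator while-loops (running place-value and counters) with an explicit digit-list pipeline: extract all base-12 digits once, partition/reorder the list (normals, then 10s, then 11s), and fold it back into an integer by Horner's rule from the high end.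
import Mathlib
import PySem

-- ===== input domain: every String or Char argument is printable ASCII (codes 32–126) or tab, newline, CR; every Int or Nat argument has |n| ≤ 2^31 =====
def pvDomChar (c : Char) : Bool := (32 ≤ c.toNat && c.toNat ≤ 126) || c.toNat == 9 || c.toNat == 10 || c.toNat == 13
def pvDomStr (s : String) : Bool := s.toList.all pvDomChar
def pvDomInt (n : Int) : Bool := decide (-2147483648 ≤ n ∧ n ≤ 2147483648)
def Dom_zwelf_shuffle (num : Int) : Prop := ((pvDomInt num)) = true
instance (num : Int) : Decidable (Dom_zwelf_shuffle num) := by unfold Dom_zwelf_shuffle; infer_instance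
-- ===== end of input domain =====

-- B rebuilds the number from an explicitly reordered base-12 digit list instead of A's three
-- accumulator loops; same cost, different structure ("alternative").

-- ===== PORT A =====
-- first while-loop: splits num into (normal_part, tens_count, elevens_count, place_value)
def zloop1 (num normal tens elevens place : Int) : Int × Int × Int × Int :=
  if 0 < num then
    if PySem.Int.mod num 12 = 10 then
      zloop1 (PySem.Int.floordiv num 12) normal (tens + 1) elevens place
    else if PySem.Int.mod num 12 = 11 then
      zloop1 (PySem.Int.floordiv num 12) normal tens (elevens + 1) place
    else
      zloop1 (PySem.Int.floordiv num 12) (normal + PySem.Int.mod num 12 * place) tens elevens (place * 12)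
  else (normal, tens, elevens, place)
termination_by num.toNat
decreasing_by
  all_goals
    simp only [PySem.Int.floordiv_eq_ediv_of_pos (by norm_num : (0:Int) < 12)] at *
  all_goals omega

-- second while-loop: appends tens_count digits 10
def zloop2 (normal tens place : Int) : Int × Int :=
  if 0 < tens then zloop2 (normal + 10 * place) (tens - 1) (place * 12) else (normal, place)
termination_by tens.toNat
decreasing_by omega

-- third while-loop: appends elevens_count digits 11
def zloop3 (normal elevens place : Int) : Int :=
  if 0 < elevens then zloop3 (normal + 11 * place) (elevens - 1) (place * 12) else normal
termination_by elevens.toNat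
decreasing_by omega

def zwelf_shuffle (num : Int) : Int :=
  let r1 := zloop1 num 0 0 0 1
  let r2 := zloop2 r1.1 r1.2.1 r1.2.2.2
  zloop3 r2.1 r1.2.2.1 r2.2

-- ===== PORT B =====
-- base-12 digits of num, low to high (the list A's first loop walks)
def zdigits (num : Int) : List Int :=
  if 0 < num then PySem.Int.mod num 12 :: zdigits (PySem.Int.floordiv num 12) else []
termination_by num.toNat
decreasing_by
  simp only [PySem.Int.floordiv_eq_ediv_of_pos (by norm_num : (0:Int) < 12)] at *
  omega

def zwelf_shuffle_alt (num : Int) : Int :=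
  let ds := zdigits num
  let reordered := ds.filter (· < 10) ++ List.replicate (ds.count 10) 10
                     ++ List.replicate (ds.count 11) 11
  reordered.reverse.foldl (fun r d => r * 12 + d) 0

-- ===== PRECONDITION & SPEC =====
def Spec_zwelf_shuffle (num : Int) (out : Int) : Prop := out = zwelf_shuffle_alt num
instance (num : Int) (out : Int) : Decidable (Spec_zwelf_shuffle num out) := by unfold Spec_zwelf_shuffle; infer_instance

-- ===== CLAIM (what is proved, stated in full; the proofs are below) =====
def Claim_equal_zwelf_shuffle : Prop := ∀ (num : Int), Dom_zwelf_shuffle num → Spec_zwelf_shuffle num (zwelf_shuffle num)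

-- ===== LEMMAS AND PROOFS =====

-- place-weighted value of a low-to-high digit list starting at place p
def zacc (ds : List Int) (p : Int) : Int :=
  match ds with
  | [] => 0
  | d :: ds => d * p + zacc ds (12 * p)

theorem zacc_scale (l : List Int) : ∀ p : Int, zacc l p = p * zacc l 1 := by
  induction l with
  | nil => intro p; simp [zacc]
  | cons d ds ih => intro p; rw [zacc, zacc, ih (12 * p), show (12:Int) * 1 = 12 from by norm_num, ih 12]; ring

theorem zacc_append (xs ys : List Int) : ∀ p : Int,
    zacc (xs ++ ys) p = zacc xs p + zacc ys (p * 12 ^ xs.length) := by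
  induction xs with
  | nil => intro p; simp [zacc]
  | cons d ds ih =>
    intro p
    rw [List.cons_append, zacc, zacc, ih (12 * p),
        show 12 * p * 12 ^ ds.length = p * 12 ^ (d :: ds).length from by
          rw [List.length_cons]; ring]
    ring

theorem zdigits_pos {num : Int} (h : 0 < num) :
    zdigits num = PySem.Int.mod num 12 :: zdigits (PySem.Int.floordiv num 12) := by
  rw [zdigits, if_pos h]

theorem zdigits_nonpos {num : Int} (h : ¬ 0 < num) : zdigits num = [] := by
  rw [zdigits, if_neg h]

theorem zloop3_eq (k : Nat) : ∀ n p : Int,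
    zloop3 n (k : Int) p = n + zacc (List.replicate k 11) p := by
  induction k with
  | zero => intro n p; rw [zloop3]; simp [zacc]
  | succ k ih =>
    intro n p
    rw [zloop3, if_pos (by omega : (0:Int) < ((k+1 : Nat) : Int)),
        show ((k+1 : Nat) : Int) - 1 = (k : Int) from by omega, ih,
        List.replicate_succ, zacc, zacc_scale (List.replicate k 11) (p * 12),
        zacc_scale (List.replicate k 11) (12 * p)]
    ring

theorem zloop2_eq (k : Nat) : ∀ n p : Int,
    zloop2 n (k : Int) p = (n + zacc (List.replicate k 10) p, p * 12 ^ k) := by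
  induction k with
  | zero => intro n p; rw [zloop2]; simp [zacc]
  | succ k ih =>
    intro n p
    rw [zloop2, if_pos (by omega : (0:Int) < ((k+1 : Nat) : Int)),
        show ((k+1 : Nat) : Int) - 1 = (k : Int) from by omega, ih,
        List.replicate_succ, zacc, zacc_scale (List.replicate k 10) (p * 12),
        zacc_scale (List.replicate k 10) (12 * p)]
    rw [Prod.mk.injEq]
    constructor
    · ring
    · rw [pow_succ]; ring

theorem zloop1_eq (num n t e p : Int) :
    zloop1 num n t e p =
      (n + zacc ((zdigits num).filter (· < 10)) p,
       t + ((zdigits num).count 10 : Int),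
       e + ((zdigits num).count 11 : Int),
       p * 12 ^ ((zdigits num).filter (· < 10)).length) := by
  induction num, n, t, e, p using zloop1.induct with
  | case1 num n t e p hpos h10 ih =>
    have hnot : ¬ ((PySem.Int.mod num 12 : Int) < 10) := by rw [h10]; omega
    have h10' : num % 12 = 10 := by
      rw [← PySem.Int.mod_eq_emod_of_pos (by norm_num : (0:Int) < 12)]; exact h10
    rw [zloop1, if_pos hpos, if_pos h10, ih, zdigits_pos hpos,
        List.filter_cons_of_neg (by simpa using hnot)]
    simp [h10', Prod.ext_iff]
    omega
  | case2 num n t e p hpos h10 h11 ih =>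
    have hge : (10:Int) ≤ PySem.Int.mod num 12 := by rw [h11]; omega
    have h11' : num % 12 = 11 := by
      rw [← PySem.Int.mod_eq_emod_of_pos (by norm_num : (0:Int) < 12)]; exact h11
    rw [zloop1, if_pos hpos, if_neg h10, if_pos h11, ih, zdigits_pos hpos,
        List.filter_cons_of_neg (by simpa using not_lt.mpr hge)]
    simp [h11', Prod.ext_iff]
    omega
  | case3 num n t e p hpos h10 h11 ih =>
    have hlt : PySem.Int.mod num 12 < 10 := by
      have h1 := PySem.Int.mod_lt num (b := 12) (by norm_num)
      omega
    have h10' : ¬ num % 12 = 10 := by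
      rw [← PySem.Int.mod_eq_emod_of_pos (by norm_num : (0:Int) < 12)]; exact h10
    have h11' : ¬ num % 12 = 11 := by
      rw [← PySem.Int.mod_eq_emod_of_pos (by norm_num : (0:Int) < 12)]; exact h11
    rw [zloop1, if_pos hpos, if_neg h10, if_neg h11, ih, zdigits_pos hpos,
        List.filter_cons_of_pos (by simpa using hlt), zacc,
        zacc_scale ((zdigits (PySem.Int.floordiv num 12)).filter (· < 10)) (12 * p),
        zacc_scale ((zdigits (PySem.Int.floordiv num 12)).filter (· < 10)) (p * 12)]
    simp [h10', h11', Prod.ext_iff, List.length_cons, pow_succ]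
    refine ⟨by ring, by ring⟩
  | case4 num n t e p hpos =>
    rw [zloop1, if_neg hpos, zdigits_nonpos hpos]
    simp [zacc]

theorem rev_foldl_eq_zacc (l : List Int) : ∀ a : Int,
    l.reverse.foldl (fun r d => r * 12 + d) a = a * 12 ^ l.length + zacc l 1 := by
  induction l with
  | nil => intro a; simp [zacc]
  | cons d ds ih =>
    intro a
    rw [List.reverse_cons, List.foldl_append, ih, List.foldl_cons, List.foldl_nil, zacc,
        show (12:Int) * 1 = 12 from by norm_num, zacc_scale ds 12, List.length_cons, pow_succ]
    ring

-- ===== VERDICT (by name: the statement is the Claim_ definition above) =====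
theorem zwelf_shuffle_spec : Claim_equal_zwelf_shuffle := by
  intro num _
  unfold Spec_zwelf_shuffle zwelf_shuffle zwelf_shuffle_alt
  rw [zloop1_eq]
  simp only [zero_add, one_mul]
  rw [zloop2_eq, zloop3_eq, rev_foldl_eq_zacc, zacc_append, zacc_append]
  simp [List.length_append, List.length_replicate, pow_add]
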